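-- pv_equiv track=rewrite | github.com/rocket-tycoon/rocket-index | extensions/zed-fsharp/scripts/validate_highlights.py | remove_predicates
-- ===== SOURCE A (Python) =====
-- def remove_predicates(content: str) -> str:
--     """Remove all predicate expressions, replacing with spaces to preserve positions."""
--     result = list(content)
--     i = 0
--     while i < len(content):
--         # Check for predicate start: (#
--         if i + 1 < len(content) and content[i] == '(' and content[i + 1] == '#':
--             start = i
--             # Skip until we find matching closing paren
--             depth = 1
--             i += 2
--             while i < len(content) and depth > 0:
--                 if content[i] == '(':
--                     depth += 1
--                 elif content[i] == ')':
--                     depth -= 1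
--                 i += 1
--             # Replace predicate with spaces (preserve newlines for line tracking)
--             for j in range(start, i):
--                 if result[j] != '\n':
--                     result[j] = ' '
--         else:
--             i += 1
--     return ''.join(result)
-- ===== SOURCE B (Python) =====
-- def remove_predicates(content: str) -> str:
--     """Remove all predicate expressions, replacing with spaces to preserve positions."""
--     out = []
--     in_pred = False
--     depth = 0
--     for i, c in enumerate(content):
--         if in_pred:
--             if c == '(':
--                 depth += 1
--             elif c == ')':
--                 depth -= 1
--             out.append(c if c == '\n' else ' ')
--             in_pred = depth > 0
--         elif c == '(' and i + 1 < len(content) and content[i + 1] == '#':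
--             in_pred = True
--             depth = 1
--             out.append(' ')
--         else:
--             out.append(c)
--     return ''.join(out)
-- ===== Notes on version B (the rewrite author's own statement) =====
-- stated objective: simpler
-- what changed: Replaced the index-based while loop with an inner skip loop and an in-place blanking pass over a mutable char list by a single flat for-loop over the characters with two state variables (in_pred, depth) that emits the output char-by-char.
import Mathlib
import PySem

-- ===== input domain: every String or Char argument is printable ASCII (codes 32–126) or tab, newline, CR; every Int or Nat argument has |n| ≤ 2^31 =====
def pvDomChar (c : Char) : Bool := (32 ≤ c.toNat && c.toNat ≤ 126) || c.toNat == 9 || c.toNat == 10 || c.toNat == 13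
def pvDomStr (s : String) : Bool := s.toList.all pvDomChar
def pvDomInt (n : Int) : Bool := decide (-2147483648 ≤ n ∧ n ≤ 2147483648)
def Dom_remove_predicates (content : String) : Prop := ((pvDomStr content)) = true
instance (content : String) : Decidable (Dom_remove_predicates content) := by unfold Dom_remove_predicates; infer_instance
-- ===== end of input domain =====

-- B replaces A's index-based skip/blank-in-place machinery with one flat char-by-char state machine; same cost, simpler.

-- ===== PORT A =====
-- inner `while i < len(content) and depth > 0` loop of A; returns the final i
def pvSkipA (cs : List Char) (i depth : Nat) : Nat :=
  if _h : i < cs.length ∧ 0 < depth then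
    let d := if cs.getD i ' ' = '(' then depth + 1
             else if cs.getD i ' ' = ')' then depth - 1 else depth
    pvSkipA cs (i + 1) d
  else i
termination_by cs.length - i

theorem pvSkipA_ge (cs : List Char) (i depth : Nat) : i ≤ pvSkipA cs i depth := by
  fun_induction pvSkipA with
  | case1 cs i depth h ih => omega
  | case2 => omega

-- `for j in range(start, i): if result[j] != '\n': result[j] = ' '`
def pvBlankA (res : List Char) (j stop : Nat) : List Char :=
  if j < stop then
    let res' := if res.getD j ' ' ≠ '\n' then res.set j ' ' else res
    pvBlankA res' (j + 1) stop
  else res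
termination_by stop - j

-- outer `while i < len(content)` loop of A over the mutable result list
def pvLoopA (cs : List Char) (res : List Char) (i : Nat) : List Char :=
  if _h : i < cs.length then
    if i + 1 < cs.length ∧ cs.getD i ' ' = '(' ∧ cs.getD (i + 1) ' ' = '#' then
      let i' := pvSkipA cs (i + 2) 1
      pvLoopA cs (pvBlankA res i i') i'
    else pvLoopA cs res (i + 1)
  else res
termination_by cs.length - i
decreasing_by
  · have := pvSkipA_ge cs (i + 2) 1; omega
  · omega

def remove_predicates (content : String) : String :=
  String.ofList (pvLoopA content.toList content.toList 0)

-- ===== PORT B =====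
def pvBlankChar (c : Char) : Char := if c = '\n' then '\n' else ' '

def pvLoopB : List Char → Bool → Nat → List Char
  | [], _, _ => []
  | c :: rest, inPred, depth =>
    if inPred then
      let d := if c = '(' then depth + 1 else if c = ')' then depth - 1 else depth
      pvBlankChar c :: pvLoopB rest (decide (0 < d)) d
    else if c = '(' ∧ rest.head? = some '#' then
      ' ' :: pvLoopB rest true 1
    else c :: pvLoopB rest false 0

def remove_predicates_alt (content : String) : String :=
  String.ofList (pvLoopB content.toList false 0)

-- ===== PRECONDITION & SPEC =====
def Spec_remove_predicates (content : String) (out : String) : Prop := out = remove_predicates_alt content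
instance (content : String) (out : String) : Decidable (Spec_remove_predicates content out) := by unfold Spec_remove_predicates; infer_instance

-- ===== CLAIM (what is proved, stated in full; the proofs are below) =====
def Claim_equal_remove_predicates : Prop := ∀ (content : String), Dom_remove_predicates content → Spec_remove_predicates content (remove_predicates content)

-- ===== LEMMAS AND PROOFS =====

theorem pvSkipA_le (cs : List Char) (i depth : Nat) :
    i ≤ cs.length → pvSkipA cs i depth ≤ cs.length := by
  fun_induction pvSkipA with
  | case1 cs i depth h ih => intro _; exact ih (by omega)
  | case2 => omega

theorem pvBlankA_of_len_le (res : List Char) : ∀ k j stop, stop - j ≤ k →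
    res.length ≤ j → pvBlankA res j stop = res := by
  intro k
  induction k with
  | zero => intro j stop hk hle; rw [pvBlankA, if_neg (by omega)]
  | succ k ih =>
      intro j stop hk hle
      by_cases hlt : j < stop
      · rw [pvBlankA]
        simp only [if_pos hlt]
        have hget : res.getD j ' ' = ' ' := by
          rw [List.getD_eq_getElem?_getD, List.getElem?_eq_none (by omega)]; rfl
        have hres : (if res.getD j ' ' ≠ '\n' then res.set j ' ' else res) = res := by
          rw [hget, if_pos (by decide), List.set_eq_of_length_le hle]
        rw [hres]
        exact ih (j + 1) stop (by omega) (by omega)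
      · rw [pvBlankA, if_neg hlt]

theorem pvBlankA_spec (t : List Char) : ∀ (r : List Char) (stop : Nat), ∀ j, r.length = j →
    pvBlankA (r ++ t) j stop =
      r ++ (t.take (stop - j)).map pvBlankChar ++ t.drop (stop - j) := by
  induction t with
  | nil =>
      intro r stop j hr
      rw [List.append_nil, pvBlankA_of_len_le r stop j stop (by omega) (by omega)]
      simp
  | cons c t ih =>
      intro r stop j hr
      by_cases hlt : j < stop
      · rw [pvBlankA]
        simp only [if_pos hlt]
        have hget : (r ++ c :: t).getD j ' ' = c := by
          rw [List.getD_eq_getElem?_getD, List.getElem?_append_right (by omega)]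
          simp [hr]
        have hset : (r ++ c :: t).set j ' ' = r ++ ' ' :: t := by
          rw [List.set_append]
          simp [hr]
        have hstep : (if (r ++ c :: t).getD j ' ' ≠ '\n' then (r ++ c :: t).set j ' '
                      else r ++ c :: t) = (r ++ [pvBlankChar c]) ++ t := by
          rw [hget, hset, pvBlankChar]
          split
          · simp_all
          · simp_all
        rw [hstep, ih (r ++ [pvBlankChar c]) stop (j + 1) (by simp [hr])]
        have h1 : stop - j = (stop - (j + 1)) + 1 := by omega
        rw [h1]
        simp
      · rw [pvBlankA]
        simp only [if_neg hlt]
        have h0 : stop - j = 0 := by omega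
        simp [h0]

theorem pvLoopB_pred (cs : List Char) : ∀ k j depth, cs.length - j ≤ k → 0 < depth →
    pvLoopB (cs.drop j) true depth =
      ((cs.drop j).take (pvSkipA cs j depth - j)).map pvBlankChar ++
        pvLoopB (cs.drop (pvSkipA cs j depth)) false 0 := by
  intro k
  induction k with
  | zero =>
      intro j depth hk hd
      have hj : cs.length ≤ j := by omega
      rw [pvSkipA, dif_neg (by omega)]
      simp [List.drop_eq_nil_of_le hj, pvLoopB]
  | succ k ih =>
      intro j depth hk hd
      by_cases hj : j < cs.length
      · have hdrop : cs.drop j = cs[j] :: cs.drop (j + 1) := List.drop_eq_getElem_cons hj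
        have hget : cs.getD j ' ' = cs[j] := List.getD_eq_getElem cs ' ' hj
        rw [pvSkipA, dif_pos ⟨hj, hd⟩]
        simp only [hget]
        set d := (if cs[j] = '(' then depth + 1 else if cs[j] = ')' then depth - 1 else depth) with hdd
        rw [hdrop]
        show pvBlankChar cs[j] :: pvLoopB (cs.drop (j + 1)) (decide (0 < d)) d = _
        by_cases hdp : 0 < d
        · rw [decide_eq_true hdp, ih (j + 1) d (by omega) hdp]
          have hge : j + 1 ≤ pvSkipA cs (j + 1) d := pvSkipA_ge cs (j + 1) d
          have h1 : pvSkipA cs (j + 1) d - j = (pvSkipA cs (j + 1) d - (j + 1)) + 1 := by omega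
          rw [h1, List.take_succ_cons, List.map_cons, List.cons_append]
        · have hd0 : d = 0 := by omega
          rw [hd0, pvSkipA, dif_neg (by omega)]
          have h1 : j + 1 - j = 1 := by omega
          rw [h1, List.take_succ_cons, List.take_zero, List.map_cons, List.map_nil,
            List.cons_append, List.nil_append]
          norm_num
      · have hj' : cs.length ≤ j := by omega
        rw [pvSkipA, dif_neg (by omega)]
        simp [List.drop_eq_nil_of_le hj', pvLoopB]

theorem pvLoopA_main (cs : List Char) : ∀ k i r, cs.length - i ≤ k → r.length = i →
    pvLoopA cs (r ++ cs.drop i) i = r ++ pvLoopB (cs.drop i) false 0 := by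
  intro k
  induction k with
  | zero =>
      intro i r hk hr
      have hi : cs.length ≤ i := by omega
      rw [pvLoopA, dif_neg (by omega)]
      simp [List.drop_eq_nil_of_le hi, pvLoopB]
  | succ k ih =>
      intro i r hk hr
      by_cases hi : i < cs.length
      · have hdrop : cs.drop i = cs[i] :: cs.drop (i + 1) := List.drop_eq_getElem_cons hi
        have hget : cs.getD i ' ' = cs[i] := List.getD_eq_getElem cs ' ' hi
        rw [pvLoopA, dif_pos hi]
        by_cases hc : i + 1 < cs.length ∧ cs.getD i ' ' = '(' ∧ cs.getD (i + 1) ' ' = '#'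
        · rw [if_pos hc]
          obtain ⟨h1, h2, h3⟩ := hc
          have hget1 : cs.getD (i + 1) ' ' = cs[i + 1] := List.getD_eq_getElem cs ' ' h1
          have hc1 : cs[i] = '(' := by rw [← hget]; exact h2
          have hc2 : cs[i + 1] = '#' := by rw [← hget1]; exact h3
          have hge2 : i + 2 ≤ pvSkipA cs (i + 2) 1 := pvSkipA_ge cs (i + 2) 1
          have hle : pvSkipA cs (i + 2) 1 ≤ cs.length := pvSkipA_le cs (i + 2) 1 (by omega)
          show pvLoopA cs (pvBlankA (r ++ cs.drop i) i (pvSkipA cs (i + 2) 1)) (pvSkipA cs (i + 2) 1)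
              = r ++ pvLoopB (cs.drop i) false 0
          set i' := pvSkipA cs (i + 2) 1 with hi'
          rw [pvBlankA_spec (cs.drop i) r i' i hr]
          have hdd : (cs.drop i).drop (i' - i) = cs.drop i' := by
            rw [List.drop_drop]; congr 1; omega
          rw [hdd]
          have hih := ih i' (r ++ ((cs.drop i).take (i' - i)).map pvBlankChar) (by omega)
            (by simp [hr]; omega)
          rw [hih, List.append_assoc]
          congr 1
          have hdrop1 : cs.drop (i + 1) = cs[i + 1] :: cs.drop (i + 2) :=
            List.drop_eq_getElem_cons h1
          have hB : pvLoopB (cs.drop i) false 0 =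
              ' ' :: ' ' :: (((cs.drop (i + 2)).take (i' - (i + 2))).map pvBlankChar ++
                pvLoopB (cs.drop i') false 0) := by
            rw [hdrop, hdrop1, hc1, hc2]
            rw [show pvLoopB ('(' :: '#' :: cs.drop (i + 2)) false 0
                  = ' ' :: ' ' :: pvLoopB (cs.drop (i + 2)) true 1 from by simp [pvLoopB, pvBlankChar]]
            rw [hi', pvLoopB_pred cs cs.length (i + 2) 1 (by omega) (by omega)]
          rw [hB]
          have htake : (cs.drop i).take (i' - i)
              = cs[i] :: cs[i + 1] :: (cs.drop (i + 2)).take (i' - (i + 2)) := by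
            rw [hdrop, hdrop1]
            have h5 : i' - i = ((i' - (i + 2)) + 1) + 1 := by omega
            rw [h5, List.take_succ_cons, List.take_succ_cons]
          have hb1 : pvBlankChar '(' = ' ' := by decide
          have hb2 : pvBlankChar '#' = ' ' := by decide
          rw [htake, List.map_cons, List.map_cons, hc1, hc2, hb1, hb2]
          simp
        · rw [if_neg hc]
          have harr : r ++ cs.drop i = (r ++ [cs[i]]) ++ cs.drop (i + 1) := by
            rw [hdrop]; simp
          rw [harr, ih (i + 1) (r ++ [cs[i]]) (by omega) (by simp [hr]), List.append_assoc,
            List.singleton_append]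
          congr 1
          have hcond : ¬ (cs[i] = '(' ∧ (cs.drop (i + 1)).head? = some '#') := by
            intro ⟨ha, hb⟩
            apply hc
            by_cases h1 : i + 1 < cs.length
            · refine ⟨h1, by rw [hget]; exact ha, ?_⟩
              have hdrop1 : cs.drop (i + 1) = cs[i + 1] :: cs.drop (i + 2) :=
                List.drop_eq_getElem_cons h1
              rw [hdrop1] at hb
              simp only [List.head?_cons, Option.some.injEq] at hb
              rw [List.getD_eq_getElem cs ' ' h1, hb]
            · rw [List.drop_eq_nil_of_le (by omega)] at hb
              simp at hb
          rw [hdrop]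
          exact (by simp only [pvLoopB, Bool.false_eq_true, if_false, if_neg hcond] :
            pvLoopB (cs[i] :: cs.drop (i + 1)) false 0
              = cs[i] :: pvLoopB (cs.drop (i + 1)) false 0).symm
      · rw [pvLoopA, dif_neg (by omega)]
        have hi' : cs.length ≤ i := by omega
        simp [List.drop_eq_nil_of_le hi', pvLoopB]

-- ===== VERDICT (by name: the statement is the Claim_ definition above) =====
theorem remove_predicates_spec : Claim_equal_remove_predicates := by
  intro content _
  unfold Spec_remove_predicates remove_predicates remove_predicates_alt
  have h := pvLoopA_main content.toList content.toList.length 0 [] (by omega) rfl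
  simp only [List.drop_zero, List.nil_append] at h
  rw [h]
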